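-- pv_equiv track=rewrite | github.com/sklesde/systeme-intelligent-distribue | In512_Project_Student-main/scripts/path_list.py | _allocate_widths_and_gaps
-- ===== SOURCE A (Python) =====
-- def _allocate_widths_and_gaps(total: int, k: int, min_gap: int = 1, max_gap: int = 4):
--     """
--     Calcule deux listes : widths (len=k) et gaps (len=k-1) telles que :
--      - sum(widths) + sum(gaps) == total
--      - chaque width >= 1
--      - chaque gap in [min_gap, max_gap]
--     Stratégie :
--      - Réserver min_gap pour chaque gap.
--      - Distribuer une largeur de base aux k segments.
--      - Répartir l'espace restant d'abord sur les gaps (jusqu'à max_gap),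
--        puis sur les widths (round-robin).
--     Lève ValueError si impossible.
--     """
--     if k <= 0:
--         return [], []
--     if k == 1:
--         return [total], []
--
--     # espace minimal demandé par les gaps
--     min_total_gaps = (k - 1) * min_gap
--     # chaque segment a au moins largeur 1
--     min_total_segments = k * 1
--     if total < (min_total_segments + min_total_gaps):
--         raise ValueError("Taille totale trop petite pour placer les segments avec les gaps demandés.")
--
--     # initialisation
--     gaps = [min_gap] * (k - 1)
--     # allouer une largeur de base aux segments
--     remaining_after_gaps = total - sum(gaps)
--     base_width = remaining_after_gaps // k
--     if base_width < 1:
--         base_width = 1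
--     widths = [base_width] * k
--
--     remaining = total - (sum(widths) + sum(gaps))
--
--     # 1) essayer d'augmenter d'abord les gaps jusqu'à max_gap (préférence pour espacer)
--     gi = 0
--     # on parcourt les gaps en cycle tant qu'il reste à distribuer
--     while remaining > 0 and any(g < max_gap for g in gaps):
--         can = max_gap - gaps[gi]
--         if can > 0:
--             add = min(can, remaining)
--             gaps[gi] += add
--             remaining -= add
--         gi = (gi + 1) % len(gaps)
--
--     # 2) si reste encore, on distribue aux widths en round-robin
--     wi = 0
--     while remaining > 0:
--         widths[wi] += 1
--         remaining -= 1
--         wi = (wi + 1) % k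
--
--     # vérification rapide
--     if sum(widths) + sum(gaps) != total:
--         # Ajustement final si problème d'arrondis (corrige en ajoutant/reduisant le dernier width)
--         diff = total - (sum(widths) + sum(gaps))
--         widths[-1] += diff
--
--     return widths, gaps
-- ===== SOURCE B (Python) =====
-- def _allocate_widths_and_gaps(total: int, k: int, min_gap: int = 1, max_gap: int = 4):
--     """Closed-form allocation: base/remainder by divmod, gaps filled greedily in
--     index order up to cap = max_gap - min_gap, leftover to the first widths."""
--     if k <= 0:
--         return [], []
--     if k == 1:
--         return [total], []
--     rem0 = total - (k - 1) * min_gap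
--     if rem0 < k:
--         raise ValueError("Taille totale trop petite pour placer les segments avec les gaps demandés.")
--     base, remaining = divmod(rem0, k)
--     cap = max(0, max_gap - min_gap)
--     if cap > 0 and remaining > 0:
--         full = min(remaining // cap, k - 1)
--         if full < k - 1:
--             gaps = [min_gap + cap] * full + [min_gap + remaining % cap] + [min_gap] * (k - 2 - full)
--             remaining = 0
--         else:
--             gaps = [min_gap + cap] * (k - 1)
--             remaining -= (k - 1) * cap
--     else:
--         gaps = [min_gap] * (k - 1)
--     widths = [base + 1] * remaining + [base] * (k - remaining)
--     return widths, gaps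
-- ===== Notes on version B (the rewrite author's own statement) =====
-- stated objective: simpler
-- what changed: Replaces the two round-robin while loops (cyclic gap saturation, then width round-robin) and the dead base-width/final-adjustment patch-up code by a closed-form divmod allocation that builds both lists directly from base, remainder, and a single gap cap.
import Mathlib
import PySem

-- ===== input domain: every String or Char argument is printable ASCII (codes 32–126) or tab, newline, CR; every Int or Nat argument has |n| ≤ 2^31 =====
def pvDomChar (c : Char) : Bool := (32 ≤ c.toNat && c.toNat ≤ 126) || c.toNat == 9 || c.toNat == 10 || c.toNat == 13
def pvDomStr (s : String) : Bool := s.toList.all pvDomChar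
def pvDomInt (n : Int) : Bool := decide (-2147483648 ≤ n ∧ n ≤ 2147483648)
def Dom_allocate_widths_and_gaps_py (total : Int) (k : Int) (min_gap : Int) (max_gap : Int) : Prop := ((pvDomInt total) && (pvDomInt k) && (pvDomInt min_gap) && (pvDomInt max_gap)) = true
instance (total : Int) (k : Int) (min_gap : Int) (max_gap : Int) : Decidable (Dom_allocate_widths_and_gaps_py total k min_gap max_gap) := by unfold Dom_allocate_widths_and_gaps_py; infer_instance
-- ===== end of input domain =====

-- B replaces A's two round-robin while loops and dead patch-up code by a closed-form
-- divmod allocation (objective: simpler); same return value on all inputs where A returns.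

-- ===== PORT A =====
-- while remaining > 0 and any(g < max_gap for g in gaps): … ; gi = (gi+1) % len(gaps)
-- (fuel is only a termination device; proved sufficient on Pre_ inputs below)
def pvAGapLoop (max_gap : Int) : Nat → List Int → Int → Nat → List Int × Int
  | 0, gaps, remaining, _ => (gaps, remaining)
  | fuel+1, gaps, remaining, gi =>
    if 0 < remaining ∧ gaps.any (fun g => decide (g < max_gap)) = true then
      let g := gaps.getD gi 0
      let can := max_gap - g
      if 0 < can then
        let gaps' := gaps.set gi (g + min can remaining)
        pvAGapLoop max_gap fuel gaps' (remaining - min can remaining) ((gi+1) % gaps'.length)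
      else
        pvAGapLoop max_gap fuel gaps remaining ((gi+1) % gaps.length)
    else (gaps, remaining)

-- while remaining > 0: widths[wi] += 1; remaining -= 1; wi = (wi+1) % k
def pvAWidthLoop (k : Nat) : Nat → List Int → Int → Nat → List Int
  | 0, widths, _, _ => widths
  | fuel+1, widths, remaining, wi =>
    if 0 < remaining then
      pvAWidthLoop k fuel (widths.set wi (widths.getD wi 0 + 1)) (remaining - 1) ((wi+1) % k)
    else widths

def allocate_widths_and_gaps_py (total : Int) (k : Int) (min_gap : Int) (max_gap : Int) : List Int × List Int :=
  if k ≤ 0 then ([], [])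
  else if k = 1 then ([total], [])
  else if total < k * 1 + (k - 1) * min_gap then ([], [])  -- Python raises ValueError here (excluded by Pre_)
  else
    let gaps := List.replicate (k - 1).toNat min_gap
    let remaining_after_gaps := total - gaps.sum
    let base_width := PySem.Int.floordiv remaining_after_gaps k
    let base_width := if base_width < 1 then 1 else base_width
    let widths := List.replicate k.toNat base_width
    let remaining := total - (widths.sum + gaps.sum)
    let gr := pvAGapLoop max_gap ((k - 1).toNat + 2) gaps remaining 0
    let gaps := gr.1
    let widths := pvAWidthLoop k.toNat (k.toNat + 2) widths gr.2 0
    if widths.sum + gaps.sum ≠ total then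
      let diff := total - (widths.sum + gaps.sum)
      (widths.set (widths.length - 1) (widths.getD (widths.length - 1) 0 + diff), gaps)
    else (widths, gaps)

-- ===== PORT B =====
def allocate_widths_and_gaps_py_alt (total : Int) (k : Int) (min_gap : Int) (max_gap : Int) : List Int × List Int :=
  if k ≤ 0 then ([], [])
  else if k = 1 then ([total], [])
  else
    let rem0 := total - (k - 1) * min_gap
    if rem0 < k then ([], [])  -- Source B raises ValueError here (excluded by Pre_)
    else
      let base := PySem.Int.floordiv rem0 k
      let remaining := PySem.Int.mod rem0 k
      let cap := max 0 (max_gap - min_gap)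
      let gr : List Int × Int :=
        if 0 < cap ∧ 0 < remaining then
          let full := min (PySem.Int.floordiv remaining cap) (k - 1)
          if full < k - 1 then
            (List.replicate full.toNat (min_gap + cap) ++ (min_gap + PySem.Int.mod remaining cap) :: List.replicate (k - 2 - full).toNat min_gap, 0)
          else
            (List.replicate (k - 1).toNat (min_gap + cap), remaining - (k - 1) * cap)
        else (List.replicate (k - 1).toNat min_gap, remaining)
      let widths := List.replicate gr.2.toNat (base + 1) ++ List.replicate (k - gr.2).toNat base
      (widths, gr.1)

-- ===== PRECONDITION & SPEC =====
-- Pre_ excludes exactly the inputs where A raises ValueError ("total too small"): k ≥ 2 with total < k + (k-1)*min_gap.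
def Pre_allocate_widths_and_gaps_py (total : Int) (k : Int) (min_gap : Int) (max_gap : Int) : Prop :=
  2 ≤ k → k + (k - 1) * min_gap ≤ total
instance (total : Int) (k : Int) (min_gap : Int) (max_gap : Int) : Decidable (Pre_allocate_widths_and_gaps_py total k min_gap max_gap) := by unfold Pre_allocate_widths_and_gaps_py; infer_instance
def pvWitness_allocate_widths_and_gaps_py : Int × Int × Int × Int := (10, 3, 1, 4)

def Spec_allocate_widths_and_gaps_py (total : Int) (k : Int) (min_gap : Int) (max_gap : Int) (out : List Int × List Int) : Prop := out = allocate_widths_and_gaps_py_alt total k min_gap max_gap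
instance (total : Int) (k : Int) (min_gap : Int) (max_gap : Int) (out : List Int × List Int) : Decidable (Spec_allocate_widths_and_gaps_py total k min_gap max_gap out) := by unfold Spec_allocate_widths_and_gaps_py; infer_instance

-- ===== CLAIM (what is proved, stated in full; the proofs are below) =====
def Claim_equal_allocate_widths_and_gaps_py : Prop := ∀ (total : Int) (k : Int) (min_gap : Int) (max_gap : Int), Dom_allocate_widths_and_gaps_py total k min_gap max_gap → Pre_allocate_widths_and_gaps_py total k min_gap max_gap → Spec_allocate_widths_and_gaps_py total k min_gap max_gap (allocate_widths_and_gaps_py total k min_gap max_gap)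

-- ===== LEMMAS AND PROOFS =====

lemma pv_getD_rep_cons (a b : Int) (gi : Nat) (t : List Int) :
    (List.replicate gi a ++ b :: t).getD gi 0 = b := by
  simp [List.getD, List.length_replicate]

lemma pv_set_rep_cons (a b c : Int) (gi : Nat) (t : List Int) :
    (List.replicate gi a ++ b :: t).set gi c = List.replicate gi a ++ c :: t := by
  rw [List.set_append_right _ _ (by simp)]
  simp

-- gap loop: immediate exit when remaining ≤ 0
lemma pvAGapLoop_zero (max_gap : Int) (fuel : Nat) (gaps : List Int) (r : Int) (gi : Nat)
    (h : r ≤ 0) : pvAGapLoop max_gap fuel gaps r gi = (gaps, r) := by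
  cases fuel with
  | zero => rfl
  | succ f => simp [pvAGapLoop]; omega

-- width loop: immediate exit when remaining ≤ 0
lemma pvAWidthLoop_exit (K fuel : Nat) (widths : List Int) (r : Int) (wi : Nat)
    (h : r ≤ 0) : pvAWidthLoop K (fuel+1) widths r wi = widths := by
  simp [pvAWidthLoop]; omega

-- gap loop: immediate exit when no gap can grow (max_gap ≤ min_gap)
lemma pvAGapLoop_nocap (min_gap max_gap : Int) (fuel : Nat) (L : Nat) (r : Int) (gi : Nat)
    (h : max_gap ≤ min_gap) :
    pvAGapLoop max_gap fuel (List.replicate L min_gap) r gi = (List.replicate L min_gap, r) := by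
  cases fuel with
  | zero => rfl
  | succ f =>
    simp only [pvAGapLoop]
    rw [if_neg]
    rintro ⟨-, hany⟩
    simp only [List.any_eq_true, List.mem_replicate, decide_eq_true_eq] at hany
    obtain ⟨g, ⟨-, rfl⟩, hlt⟩ := hany
    omega

-- main characterization of the gap loop under the invariant
lemma pvAGapLoop_fill (min_gap max_gap : Int) (hcap : min_gap < max_gap) (L : Nat) :
    ∀ m gi r fuel j rest, gi + m + 1 = L → m + 3 ≤ fuel →
      0 < rest → rest ≤ max_gap - min_gap → r = j * (max_gap - min_gap) + rest → 0 ≤ j →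
      ((j ≤ (m : Int) →
        pvAGapLoop max_gap fuel (List.replicate gi max_gap ++ List.replicate (m+1) min_gap) r gi
          = (List.replicate (gi + j.toNat) max_gap ++ (min_gap + rest) :: List.replicate (m - j.toNat) min_gap, 0)) ∧
       ((m : Int) < j →
        pvAGapLoop max_gap fuel (List.replicate gi max_gap ++ List.replicate (m+1) min_gap) r gi
          = (List.replicate L max_gap, r - (m+1) * (max_gap - min_gap)))) := by
  intro m
  induction m with
  | zero =>
    intro gi r fuel j rest hL hfuel hrest1 hrest2 hr hj
    obtain ⟨f, rfl⟩ : ∃ f, fuel = f + 1 := ⟨fuel - 1, by omega⟩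
    have hjcap : 0 ≤ j * (max_gap - min_gap) := mul_nonneg hj (by omega)
    have hrpos : 0 < r := by omega
    simp only [pvAGapLoop, List.replicate_succ]
    rw [if_pos ⟨hrpos, by
      simp only [List.any_eq_true, decide_eq_true_eq]
      exact ⟨min_gap, by simp, hcap⟩⟩]
    simp only [pv_getD_rep_cons]
    rw [if_pos (by omega)]
    simp only [pv_set_rep_cons]
    constructor
    · intro hj0
      have hjz : j = 0 := by omega
      subst hjz
      have hrr : r = rest := by omega
      have hmin : min (max_gap - min_gap) r = r := min_eq_right (by omega)
      rw [hmin]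
      rw [pvAGapLoop_zero _ _ _ _ _ (by omega)]
      simp [hrr]
    · intro hj0
      have hj1 : (1:Int) ≤ j := by omega
      have hcapr : max_gap - min_gap ≤ r := by nlinarith
      have hmin : min (max_gap - min_gap) r = max_gap - min_gap := min_eq_left hcapr
      rw [hmin]
      have hgmax : min_gap + (max_gap - min_gap) = max_gap := by ring
      have hlist : List.replicate gi max_gap ++ (min_gap + (max_gap - min_gap)) :: List.replicate 0 min_gap
          = List.replicate L max_gap := by
        rw [hgmax, show L = gi + 1 by omega, List.replicate_succ' (n := gi) (a := max_gap)]
        simp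
      rw [hlist]
      have hrem : 0 < r - (max_gap - min_gap) := by nlinarith
      obtain ⟨f2, rfl⟩ : ∃ f2, f = f2 + 1 := ⟨f - 1, by omega⟩
      simp only [pvAGapLoop]
      rw [if_neg (by
        rintro ⟨-, hany⟩
        simp only [List.any_eq_true, List.mem_replicate, decide_eq_true_eq] at hany
        obtain ⟨g, ⟨-, rfl⟩, hlt⟩ := hany
        omega)]
      refine Prod.ext rfl ?_
      push_cast
      ring
  | succ m ih =>
    intro gi r fuel j rest hL hfuel hrest1 hrest2 hr hj
    obtain ⟨f, rfl⟩ : ∃ f, fuel = f + 1 := ⟨fuel - 1, by omega⟩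
    have hjcap : 0 ≤ j * (max_gap - min_gap) := mul_nonneg hj (by omega)
    have hrpos : 0 < r := by omega
    simp only [pvAGapLoop, List.replicate_succ]
    rw [if_pos ⟨hrpos, by
      simp only [List.any_eq_true, decide_eq_true_eq]
      exact ⟨min_gap, by simp, hcap⟩⟩]
    simp only [pv_getD_rep_cons]
    rw [if_pos (by omega)]
    simp only [pv_set_rep_cons]
    by_cases hjz : j = 0
    · subst hjz
      have hrr : r = rest := by omega
      have hmin : min (max_gap - min_gap) r = r := min_eq_right (by omega)
      rw [hmin]
      rw [pvAGapLoop_zero _ _ _ _ _ (by omega)]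
      constructor
      · intro _
        simp [hrr, List.replicate_succ]
      · intro hlt
        exfalso
        omega
    · have hj1 : (1:Int) ≤ j := by omega
      have hjcap2 : 0 ≤ (j - 1) * (max_gap - min_gap) := mul_nonneg (by omega) (by omega)
      have hcapr : max_gap - min_gap ≤ r := by nlinarith
      have hmin : min (max_gap - min_gap) r = max_gap - min_gap := min_eq_left hcapr
      rw [hmin]
      have hgmax : min_gap + (max_gap - min_gap) = max_gap := by ring
      have hlist : List.replicate gi max_gap ++ (min_gap + (max_gap - min_gap)) :: min_gap :: List.replicate m min_gap
          = List.replicate (gi+1) max_gap ++ List.replicate (m+1) min_gap := by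
        rw [hgmax, List.replicate_succ' (n := gi) (a := max_gap), List.replicate_succ]
        simp
      rw [hlist]
      have hlen : (List.replicate (gi+1) max_gap ++ List.replicate (m+1) min_gap).length = L := by
        simp
        omega
      rw [hlen]
      have hmod : (gi + 1) % L = gi + 1 := Nat.mod_eq_of_lt (by omega)
      rw [hmod]
      have hrec := ih (gi+1) (r - (max_gap - min_gap)) f (j-1) rest (by omega) (by omega)
        hrest1 hrest2 (by rw [hr]; ring) (by omega)
      constructor
      · intro hjm
        rw [(hrec.1 (by push_cast at hjm; omega) : _)]
        have e1 : gi + 1 + (j-1).toNat = gi + j.toNat := by omega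
        have e2 : m - (j-1).toNat = m + 1 - j.toNat := by omega
        rw [e1, e2]
      · intro hjm
        rw [(hrec.2 (by push_cast at hjm; omega) : _)]
        refine Prod.ext rfl ?_
        push_cast
        ring


-- width loop characterization
lemma pvAWidthLoop_fill (base : Int) (K : Nat) (_hK : 1 ≤ K) :
    ∀ n wi fuel, wi + n ≤ K → n + 2 ≤ fuel →
      pvAWidthLoop K fuel (List.replicate wi (base+1) ++ List.replicate (K - wi) base) (n : Int) wi
        = List.replicate (wi + n) (base+1) ++ List.replicate (K - wi - n) base := by
  intro n
  induction n with
  | zero =>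
    intro wi fuel hwi hfuel
    obtain ⟨f, rfl⟩ : ∃ f, fuel = f + 1 := ⟨fuel - 1, by omega⟩
    simp [pvAWidthLoop]
  | succ n ih =>
    intro wi fuel hwi hfuel
    obtain ⟨f, rfl⟩ : ∃ f, fuel = f + 1 := ⟨fuel - 1, by omega⟩
    have hKwi : K - wi = (K - wi - 1) + 1 := by omega
    simp only [pvAWidthLoop]
    rw [if_pos (by positivity)]
    rw [hKwi, List.replicate_succ, pv_getD_rep_cons, pv_set_rep_cons]
    have hlist : List.replicate wi (base+1) ++ (base + 1) :: List.replicate (K - wi - 1) base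
        = List.replicate (wi+1) (base+1) ++ List.replicate (K - (wi+1)) base := by
      rw [List.replicate_succ' (n := wi)]
      simp [Nat.sub_sub]
    have hcast : ((n+1 : Nat) : Int) - 1 = (n : Int) := by push_cast; ring
    rw [hlist, hcast]
    by_cases hlt : wi + 1 < K
    · rw [Nat.mod_eq_of_lt hlt]
      rw [ih (wi+1) f (by omega) (by omega)]
      congr 1 <;> (congr 1; omega)
    · have hK : wi + 1 = K := by omega
      have hn : n = 0 := by omega
      subst hn
      rw [hK, Nat.mod_self]
      obtain ⟨f2, rfl⟩ : ∃ f2, f = f2 + 1 := ⟨f - 1, by omega⟩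
      simp only [pvAWidthLoop]
      rw [if_neg (by simp)]
      congr 1 <;> (congr 1; omega)

-- width loop from the freshly initialized widths, plus its sum
lemma pv_loop2_sum (k base R : Int) (hk : 2 ≤ k) (hR0 : 0 ≤ R) (hRk : R < k) :
    pvAWidthLoop k.toNat (k.toNat + 2) (List.replicate k.toNat base) R 0
      = List.replicate R.toNat (base+1) ++ List.replicate (k-R).toNat base ∧
    (List.replicate R.toNat (base+1) ++ List.replicate (k-R).toNat base).sum = k * base + R := by
  constructor
  · have hw := pvAWidthLoop_fill base k.toNat (by omega) R.toNat 0 (k.toNat + 2) (by omega) (by omega)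
    simp only [List.replicate_zero, List.nil_append, Nat.sub_zero, Nat.zero_add] at hw
    have hcast : ((R.toNat : Nat) : Int) = R := by omega
    rw [hcast] at hw
    rw [hw]
    have hcount : k.toNat - R.toNat = (k - R).toNat := by omega
    rw [hcount]
  · simp only [List.sum_append, List.sum_replicate, nsmul_eq_mul]
    have e1 : ((R.toNat : Nat) : Int) = R := by omega
    have e2 : (((k - R).toNat : Nat) : Int) = k - R := by omega
    rw [e1, e2]
    ring

lemma pv_core (total k min_gap max_gap : Int) (hk : 2 ≤ k) (ht : k + (k-1)*min_gap ≤ total) :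
    allocate_widths_and_gaps_py total k min_gap max_gap = allocate_widths_and_gaps_py_alt total k min_gap max_gap := by
  have hk0 : ¬ k ≤ 0 := by omega
  have hk1 : ¬ k = 1 := by omega
  have hg1 : ¬ total < k * 1 + (k - 1) * min_gap := by rw [mul_one]; exact not_lt.mpr ht
  have hg2 : ¬ total - (k - 1) * min_gap < k := by linarith
  have hLcast : (((k-1).toNat : Nat) : Int) = k - 1 := Int.toNat_of_nonneg (by omega)
  have hKcast : ((k.toNat : Nat) : Int) = k := Int.toNat_of_nonneg (by omega)
  simp only [allocate_widths_and_gaps_py, allocate_widths_and_gaps_py_alt,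
    if_neg hk0, if_neg hk1, if_neg hg1, if_neg hg2, List.sum_replicate, nsmul_eq_mul,
    hLcast, hKcast]
  have hbase : ¬ PySem.Int.floordiv (total - (k - 1) * min_gap) k < 1 := by
    rw [not_lt, PySem.Int.le_floordiv_iff_mul_le (by omega)]
    linarith
  simp only [if_neg hbase]
  set rem0 := total - (k - 1) * min_gap with hrem0
  have hdm := PySem.Int.floordiv_mul_add_mod rem0 k
  set base := PySem.Int.floordiv rem0 k with hbase'
  set r := PySem.Int.mod rem0 k with hr'
  have hrinit : total - (k * base + (k - 1) * min_gap) = r := by linarith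
  rw [hrinit]
  have hremod : r = rem0 % k := by rw [hr']; exact PySem.Int.mod_eq_emod_of_pos (by omega)
  have hr0 : 0 ≤ r := by rw [hremod]; exact Int.emod_nonneg _ (by omega)
  have hrk : r < k := by rw [hremod]; exact Int.emod_lt_of_pos _ (by omega)
  by_cases hrz : r = 0
  · -- C1 : remainder zero, both loops do nothing
    rw [hrz, pvAGapLoop_zero _ _ _ _ _ le_rfl]
    dsimp only
    rw [pvAWidthLoop_exit _ _ _ _ _ le_rfl]
    rw [if_neg (by
      simp only [List.sum_replicate, nsmul_eq_mul, ne_eq, not_not]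
      have e1 : ((k.toNat : Nat) : Int) = k := by omega
      rw [e1, hLcast]; linarith)]
    rw [if_neg (by simp)]
    simp
  · -- r > 0
    have hrpos : 0 < r := by omega
    by_cases hcm : max_gap ≤ min_gap
    · -- C2 : gaps cannot grow (max_gap ≤ min_gap); everything goes to the widths
      have hmax0 : max 0 (max_gap - min_gap) = 0 := max_eq_left (by omega)
      rw [pvAGapLoop_nocap min_gap max_gap _ _ _ _ hcm]
      dsimp only
      rw [(pv_loop2_sum k base r hk hr0 hrk).1]
      rw [if_neg (by
        rw [(pv_loop2_sum k base r hk hr0 hrk).2]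
        simp only [List.sum_replicate, nsmul_eq_mul, ne_eq, not_not, hLcast]
        linarith)]
      rw [if_neg (by rw [hmax0]; simp)]
    · -- C3 : gaps can grow
      have hcap : min_gap < max_gap := by omega
      have hmaxc : max 0 (max_gap - min_gap) = max_gap - min_gap := max_eq_right (by omega)
      rw [hmaxc]
      rw [if_pos (show (0:Int) < max_gap - min_gap ∧ 0 < r from ⟨by omega, hrpos⟩)]
      have hgmax : min_gap + (max_gap - min_gap) = max_gap := by ring
      set q := PySem.Int.floordiv r (max_gap - min_gap) with hq'
      set rm := PySem.Int.mod r (max_gap - min_gap) with hrm'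
      have hdm2 : q * (max_gap - min_gap) + rm = r := by
        rw [hq', hrm']; exact PySem.Int.floordiv_mul_add_mod r _
      have hrmemod : rm = r % (max_gap - min_gap) := by
        rw [hrm']; exact PySem.Int.mod_eq_emod_of_pos (by omega)
      have hrm0 : 0 ≤ rm := by rw [hrmemod]; exact Int.emod_nonneg _ (by omega)
      have hrmc : rm < max_gap - min_gap := by rw [hrmemod]; exact Int.emod_lt_of_pos _ (by omega)
      have hq0 : 0 ≤ q := by
        rw [hq']; exact (PySem.Int.le_floordiv_iff_mul_le (by omega)).mpr (by linarith)
      have hqcap : 0 ≤ q * (max_gap - min_gap) := mul_nonneg hq0 (by omega)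
      have hm : (((k-1).toNat - 1 : Nat) : Int) = k - 2 := by omega
      by_cases hrm : rm = 0
      · -- remainder of r by cap is zero: decomposition j = q - 1, rest = cap
        have hqne : q ≠ 0 := by
          intro h; rw [h] at hdm2; simp at hdm2; omega
        have hq1 : 1 ≤ q := by omega
        have hfill := pvAGapLoop_fill min_gap max_gap hcap (k-1).toNat ((k-1).toNat - 1) 0 r
          ((k-1).toNat + 2) (q-1) (max_gap - min_gap) (by omega) (by omega) (by omega) le_rfl
          (by linear_combination hrm - hdm2) (by omega)
        simp only [List.replicate_zero, List.nil_append, Nat.zero_add] at hfill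
        rw [show (k-1).toNat - 1 + 1 = (k-1).toNat from by omega] at hfill
        by_cases hql : q < k - 1
        · -- all of r fits into the first q gaps
          rw [hfill.1 (by rw [hm]; omega)]
          dsimp only
          rw [pvAWidthLoop_exit _ _ _ _ _ le_rfl]
          rw [min_eq_left (by omega : q ≤ k - 1), if_pos hql]
          dsimp only
          rw [if_neg (by
            simp only [List.sum_append, List.sum_cons, List.sum_replicate, nsmul_eq_mul, ne_eq, not_not]
            have e1 : (((q-1).toNat : Nat) : Int) = q - 1 := by omega
            have e2 : ((((k-1).toNat - 1 - (q-1).toNat : Nat)) : Int) = k - 1 - q := by omega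
            have e3 : ((k.toNat : Nat) : Int) = k := by omega
            rw [e1, e2, e3]
            linear_combination hdm + hrem0 + hdm2 - hrm)]
          rw [hrm, add_zero]
          have eA : List.replicate (q-1).toNat max_gap ++ (min_gap + (max_gap - min_gap)) :: List.replicate ((k-1).toNat - 1 - (q-1).toNat) min_gap
              = List.replicate q.toNat max_gap ++ List.replicate ((k-1).toNat - 1 - (q-1).toNat) min_gap := by
            rw [hgmax, List.append_cons, ← List.replicate_succ' (n := (q-1).toNat),
              show (q-1).toNat + 1 = q.toNat from by omega]
          have eB : List.replicate q.toNat (min_gap + (max_gap - min_gap)) ++ min_gap :: List.replicate (k - 2 - q).toNat min_gap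
              = List.replicate q.toNat max_gap ++ List.replicate ((k-1).toNat - 1 - (q-1).toNat) min_gap := by
            rw [hgmax, ← List.replicate_succ,
              show (k - 2 - q).toNat + 1 = (k-1).toNat - 1 - (q-1).toNat from by omega]
          rw [eA, eB]
          simp
        · -- q ≥ k - 1 with rm = 0
          rw [min_eq_right (by omega : k - 1 ≤ q)]
          rw [if_neg (show ¬ (k - 1 < k - 1) from by omega)]
          by_cases hqe : q = k - 1
          · -- exact saturation boundary
            rw [hfill.1 (by rw [hm]; omega)]
            dsimp only
            have hR2 : r - (k - 1) * (max_gap - min_gap) = 0 := by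
              linear_combination hrm - hdm2 + (max_gap - min_gap) * hqe
            rw [pvAWidthLoop_exit _ _ _ _ _ le_rfl]
            rw [if_neg (by
              simp only [List.sum_append, List.sum_cons, List.sum_replicate, nsmul_eq_mul, ne_eq, not_not]
              have e1 : (((q-1).toNat : Nat) : Int) = q - 1 := by omega
              have e2 : ((((k-1).toNat - 1 - (q-1).toNat : Nat)) : Int) = 0 := by omega
              have e3 : ((k.toNat : Nat) : Int) = k := by omega
              rw [e1, e2, e3]
              linear_combination hdm + hrem0 + hdm2 + min_gap * hqe - hrm)]
            rw [hR2]
            have eA : List.replicate (q-1).toNat max_gap ++ (min_gap + (max_gap - min_gap)) :: List.replicate ((k-1).toNat - 1 - (q-1).toNat) min_gap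
                = List.replicate (k-1).toNat max_gap := by
              rw [hgmax, show (k-1).toNat - 1 - (q-1).toNat = 0 from by omega,
                List.replicate_zero, List.append_cons, ← List.replicate_succ' (n := (q-1).toNat),
                show (q-1).toNat + 1 = (k-1).toNat from by omega, List.append_nil]
            rw [eA, hgmax]
            simp
          · -- strictly more than the gaps can take
            have hqgt : k - 1 < q := by omega
            rw [hfill.2 (by rw [hm]; omega)]
            dsimp only
            rw [show ((((k-1).toNat - 1 : Nat)) : Int) + 1 = (((k-1).toNat : Nat) : Int) from by omega]
            have hR2pos : 0 < r - ((((k-1).toNat : Nat)) : Int) * (max_gap - min_gap) := by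
              rw [hLcast]
              nlinarith [mul_nonneg (show (0:Int) ≤ q - k + 1 - 1 from by omega)
                (show (0:Int) ≤ max_gap - min_gap - 1 from by omega)]
            have hR2k : r - ((((k-1).toNat : Nat)) : Int) * (max_gap - min_gap) < k := by
              rw [hLcast]
              nlinarith [mul_nonneg (show (0:Int) ≤ k - 1 from by omega) (show (0:Int) ≤ max_gap - min_gap from by omega)]
            rw [(pv_loop2_sum k base _ hk (le_of_lt hR2pos) hR2k).1]
            rw [if_neg (by
              rw [(pv_loop2_sum k base _ hk (le_of_lt hR2pos) hR2k).2]
              simp only [List.sum_replicate, nsmul_eq_mul, ne_eq, not_not, hLcast]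
              linear_combination hdm + hrem0)]
            rw [hLcast, hgmax]
      · -- rm > 0: decomposition j = q, rest = rm
        have hfill := pvAGapLoop_fill min_gap max_gap hcap (k-1).toNat ((k-1).toNat - 1) 0 r
          ((k-1).toNat + 2) q rm (by omega) (by omega) (by omega) (by omega) hdm2.symm hq0
        simp only [List.replicate_zero, List.nil_append, Nat.zero_add] at hfill
        rw [show (k-1).toNat - 1 + 1 = (k-1).toNat from by omega] at hfill
        by_cases hql : q < k - 1
        · rw [hfill.1 (by rw [hm]; omega)]
          dsimp only
          rw [pvAWidthLoop_exit _ _ _ _ _ le_rfl]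
          rw [min_eq_left (by omega : q ≤ k - 1), if_pos hql]
          dsimp only
          rw [if_neg (by
            simp only [List.sum_append, List.sum_cons, List.sum_replicate, nsmul_eq_mul, ne_eq, not_not]
            have e1 : ((q.toNat : Nat) : Int) = q := by omega
            have e2 : ((((k-1).toNat - 1 - q.toNat : Nat)) : Int) = k - 2 - q := by omega
            have e3 : ((k.toNat : Nat) : Int) = k := by omega
            rw [e1, e2, e3]
            linear_combination hdm + hrem0 + hdm2)]
          rw [hgmax, show (k - 2 - q).toNat = (k-1).toNat - 1 - q.toNat from by omega]
          simp
        · -- q ≥ k - 1 with rm > 0: gaps saturate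
          rw [min_eq_right (by omega : k - 1 ≤ q)]
          rw [if_neg (show ¬ (k - 1 < k - 1) from by omega)]
          rw [hfill.2 (by rw [hm]; omega)]
          dsimp only
          rw [show ((((k-1).toNat - 1 : Nat)) : Int) + 1 = (((k-1).toNat : Nat) : Int) from by omega]
          have hR2pos : 0 < r - ((((k-1).toNat : Nat)) : Int) * (max_gap - min_gap) := by
            rw [hLcast]
            nlinarith [mul_nonneg (show (0:Int) ≤ q - (k - 1) from by omega)
              (show (0:Int) ≤ max_gap - min_gap from by omega), show (1:Int) ≤ rm from by omega]
          have hR2k : r - ((((k-1).toNat : Nat)) : Int) * (max_gap - min_gap) < k := by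
            rw [hLcast]
            nlinarith [mul_nonneg (show (0:Int) ≤ k - 1 from by omega) (show (0:Int) ≤ max_gap - min_gap from by omega)]
          rw [(pv_loop2_sum k base _ hk (le_of_lt hR2pos) hR2k).1]
          rw [if_neg (by
            rw [(pv_loop2_sum k base _ hk (le_of_lt hR2pos) hR2k).2]
            simp only [List.sum_replicate, nsmul_eq_mul, ne_eq, not_not, hLcast]
            linear_combination hdm + hrem0)]
          rw [hLcast, hgmax]


-- ===== VERDICT (by name: the statement is the Claim_ definition above) =====
theorem allocate_widths_and_gaps_py_spec : Claim_equal_allocate_widths_and_gaps_py := by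
  intro total k min_gap max_gap _ hpre
  unfold Spec_allocate_widths_and_gaps_py
  by_cases hk2 : 2 ≤ k
  · exact pv_core total k min_gap max_gap hk2 (hpre hk2)
  · simp only [allocate_widths_and_gaps_py, allocate_widths_and_gaps_py_alt]
    by_cases hk0 : k ≤ 0
    · rw [if_pos hk0, if_pos hk0]
    · have hk1 : k = 1 := by omega
      subst hk1
      norm_num
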